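-- pv_equiv track=rewrite | github.com/thatsokay/advent-of-code | 2019/08/solution.py | part2
-- ===== SOURCE A (Python) =====
-- def part2(pixels):
--     image = ['2'] * 25 * 6
--     for i, pixel in enumerate(pixels):
--         position = i % (25 * 6)
--         if image[position] == '2':
--             image[position] = pixel
--
--     return '\n'.join(
--         ''.join(image[i * 25:(i + 1) * 25]).replace('0', ' ').replace('1', '#')
--         for i in range(6)
--     )
-- ===== SOURCE B (Python) =====
-- def part2(pixels):
--     n = len(pixels)
--
--     def composite(p):
--         # first non-transparent pixel at position p, scanning layer by layer
--         for i in range(p, n, 150):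
--             if pixels[i] != '2':
--                 return pixels[i]
--         return '2'
--
--     image = [composite(p) for p in range(150)]
--     return '\n'.join(
--         ''.join(image[i * 25:(i + 1) * 25]).replace('0', ' ').replace('1', '#')
--         for i in range(6)
--     )
-- ===== Notes on version B (the rewrite author's own statement) =====
-- stated objective: alternative
-- what changed: B composites column-wise: for each of the 150 positions it strides through the layers (range(p, n, 150)) and stops at the first non-'2' pixel, instead of A's single layer-major sweep that mutates a 150-slot image under an == '2' guard; the rendering tail is unchanged.
import Mathlib
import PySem

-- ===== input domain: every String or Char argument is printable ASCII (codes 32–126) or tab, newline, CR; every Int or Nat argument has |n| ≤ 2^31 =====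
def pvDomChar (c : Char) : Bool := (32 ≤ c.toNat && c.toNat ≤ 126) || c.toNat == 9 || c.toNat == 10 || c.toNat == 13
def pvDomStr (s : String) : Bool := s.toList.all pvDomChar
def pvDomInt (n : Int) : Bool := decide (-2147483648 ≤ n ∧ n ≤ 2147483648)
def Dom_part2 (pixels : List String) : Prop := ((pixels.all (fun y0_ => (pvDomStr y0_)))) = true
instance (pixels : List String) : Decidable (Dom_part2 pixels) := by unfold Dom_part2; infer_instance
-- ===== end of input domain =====

-- B composites column-wise (per position, striding through the layers with early exit)
-- instead of A's layer-major sweep mutating the image under an == '2' guard; same rendering tail.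

-- shared rendering tail (textually identical in both Python sources):
-- '\n'.join(''.join(image[i*25:(i+1)*25]).replace('0',' ').replace('1','#') for i in range(6))
def renderRows (image : List String) : String :=
  PySem.Str.join "\n" ((PySem.List.pyRange 0 6 1).map (fun i =>
    PySem.Str.replace (PySem.Str.replace
      (PySem.Str.join "" (PySem.List.slice image (some (i * 25)) (some ((i + 1) * 25)))) "0" " ") "1" "#"))

-- ===== PORT A =====
-- the enumerate loop; i ≥ 0 and i % 150 < 150 = image length throughout, so
-- List.getD/List.set with a Nat index are exact for Python's image[position] read/write
def part2Go : List String → Nat → List String → List String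
  | img, _, [] => img
  | img, i, px :: rest =>
      part2Go (if img.getD (i % 150) "" = "2" then img.set (i % 150) px else img) (i + 1) rest

def part2 (pixels : List String) : String :=
  renderRows (part2Go (List.replicate 150 "2") 0 pixels)

-- ===== PORT B =====
-- for i in range(p, n, 150): if pixels[i] != '2': return pixels[i]   (pixels[i] always in range)
def compositeGo (pixels : List String) : List Int → String
  | [] => "2"
  | i :: rest =>
      if PySem.List.pyGetD pixels i "" ≠ "2" then PySem.List.pyGetD pixels i ""
      else compositeGo pixels rest

def composite (pixels : List String) (p : Int) : String :=
  compositeGo pixels (PySem.List.pyRange p (pixels.length : Int) 150)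

def part2_alt (pixels : List String) : String :=
  renderRows ((PySem.List.pyRange 0 150 1).map (fun p => composite pixels p))

-- ===== PRECONDITION & SPEC =====
def Spec_part2 (pixels : List String) (out : String) : Prop := out = part2_alt pixels
instance (pixels : List String) (out : String) : Decidable (Spec_part2 pixels out) := by unfold Spec_part2; infer_instance

-- ===== CLAIM (what is proved, stated in full; the proofs are below) =====
def Claim_equal_part2 : Prop := ∀ (pixels : List String), Dom_part2 pixels → Spec_part2 pixels (part2 pixels)

-- ===== LEMMAS AND PROOFS =====

-- the common specification: first pixel at an index ≡ p (mod 150) that differs from "2", else "2"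
def firstNe2 : List String → Nat → Nat → String
  | [], _, _ => "2"
  | px :: rest, i, p => if i % 150 = p ∧ px ≠ "2" then px else firstNe2 rest (i + 1) p

theorem part2Go_length (pxs : List String) : ∀ (img : List String) (i : Nat),
    (part2Go img i pxs).length = img.length := by
  induction pxs with
  | nil => intro img i; rfl
  | cons px rest ih =>
      intro img i
      simp only [part2Go, ih]
      split_ifs <;> simp

theorem part2Go_getD (pxs : List String) : ∀ (img : List String) (i p : Nat),
    img.length = 150 → p < 150 →
    (part2Go img i pxs).getD p "" =
      if img.getD p "" = "2" then firstNe2 pxs i p else img.getD p "" := by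
  induction pxs with
  | nil =>
      intro img i p _ _
      simp only [part2Go, firstNe2]
      split_ifs with h
      · exact h
      · rfl
  | cons px rest ih =>
      intro img i p hlen hp
      simp only [part2Go, firstNe2]
      by_cases hip : i % 150 = p
      · rw [hip]
        by_cases hc : img.getD p "" = "2"
        · rw [if_pos hc, ih (img.set p px) (i + 1) p (by simp [hlen]) hp]
          have hset : (img.set p px).getD p "" = px := by
            rw [List.getD_eq_getElem _ _ (by simp [hlen]; omega)]
            simp
          rw [hset, if_pos hc]
          by_cases hpx : px = "2"
          · simp [hpx]
          · simp [hpx]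
        · rw [if_neg hc, ih img (i + 1) p hlen hp, if_neg hc, if_neg hc]
      · have himg' : ∀ img' : List String,
            (if img.getD (i % 150) "" = "2" then img.set (i % 150) px else img) = img' →
            img'.getD p "" = img.getD p "" := by
          intro img' h
          subst h
          split_ifs
          · rcases Nat.lt_or_ge p img.length with hplt | hge
            · rw [List.getD_eq_getElem _ _ (by simpa using hplt),
                  List.getD_eq_getElem _ _ (by simpa [List.length_set] using hplt)]
              simp [hip]
            · omega
          · rfl
        rw [ih _ (i + 1) p (by split_ifs <;> simp [hlen]) hp,
            himg' _ rfl]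
        simp [hip]

-- stepping the spec past one index that is not ≡ p (mod 150)
theorem firstNe2_drop_step (pixels : List String) (s p : Nat) (hne : s % 150 ≠ p) :
    firstNe2 (pixels.drop s) s p = firstNe2 (pixels.drop (s + 1)) (s + 1) p := by
  by_cases hs : s < pixels.length
  · rw [List.drop_eq_getElem_cons hs]
    simp [firstNe2, hne]
  · rw [List.drop_eq_nil_of_le (by omega), List.drop_eq_nil_of_le (by omega)]
    rfl

theorem firstNe2_skip (pixels : List String) : ∀ (k s p : Nat),
    (∀ u, s ≤ u → u < s + k → u % 150 ≠ p) →
    firstNe2 (pixels.drop s) s p = firstNe2 (pixels.drop (s + k)) (s + k) p := by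
  intro k
  induction k with
  | zero => intro s p _; rfl
  | succ k ih =>
      intro s p h
      rw [firstNe2_drop_step pixels s p (h s le_rfl (by omega))]
      have h2 : s + 1 + k = s + (k + 1) := by omega
      have := ih (s + 1) p (fun u hu1 hu2 => h u (by omega) (by omega))
      rw [h2] at this
      exact this

-- pyRange with step 150: nil and cons unfoldings
theorem pyRange150_nil (a b : Int) (h : b ≤ a) : PySem.List.pyRange a b 150 = [] := by
  rw [PySem.List.pyRange_of_pos a b (s := 150) (by norm_num), if_neg (by omega)]
  simp

theorem pyRange150_cons (a b : Int) (h : a < b) :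
    PySem.List.pyRange a b 150 = a :: PySem.List.pyRange (a + 150) b 150 := by
  rw [PySem.List.pyRange_of_pos a b (s := 150) (by norm_num),
      PySem.List.pyRange_of_pos (a + 150) b (s := 150) (by norm_num)]
  rw [if_pos h]
  by_cases h2 : a + 150 < b
  · rw [if_pos h2]
    have hc : ((b - a + 150 - 1) / 150).toNat = ((b - (a + 150) + 150 - 1) / 150).toNat + 1 := by
      omega
    rw [hc, List.range_succ_eq_map]
    simp only [List.map_cons, List.map_map]
    congr 1
    · simp
    · apply List.map_congr_left
      intro k _
      simp only [Function.comp_apply]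
      push_cast
      ring
  · rw [if_neg h2]
    have hc : ((b - a + 150 - 1) / 150).toNat = 1 := by omega
    rw [hc]
    simp

theorem compositeGo_eq (pixels : List String) : ∀ (fuel j p : Nat),
    pixels.length ≤ j + fuel → p < 150 → j % 150 = p →
    compositeGo pixels (PySem.List.pyRange (j : Int) (pixels.length : Int) 150) =
      firstNe2 (pixels.drop j) j p := by
  intro fuel
  induction fuel with
  | zero =>
      intro j p hle _ _
      rw [pyRange150_nil _ _ (by exact_mod_cast hle), List.drop_eq_nil_of_le (by omega)]
      rfl
  | succ fuel ih =>
      intro j p hle hp hjp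
      by_cases hj : j < pixels.length
      · rw [pyRange150_cons _ _ (by exact_mod_cast hj)]
        simp only [compositeGo]
        have hget : PySem.List.pyGetD pixels (j : Int) "" = pixels[j] := by
          rw [PySem.List.pyGetD_natCast, List.getD_eq_getElem _ _ (by simpa using hj)]
        rw [List.drop_eq_getElem_cons hj]
        simp only [firstNe2, hjp]
        by_cases hpx : pixels[j] = "2"
        · rw [if_neg (by simp [hget, hpx]), if_neg (by simp [hpx])]
          have hcast : (j : Int) + 150 = ((j + 150 : Nat) : Int) := by push_cast; ring
          rw [hcast, ih (j + 150) p (by omega) hp (by omega)]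
          have := firstNe2_skip pixels 149 (j + 1) p (fun u hu1 hu2 => by omega)
          rw [this]
        · rw [if_pos (by simp [hget, hpx]), if_pos (by simp [hpx]), hget]
      · rw [pyRange150_nil _ _ (by exact_mod_cast (by omega : pixels.length ≤ j)),
            List.drop_eq_nil_of_le (by omega)]
        rfl

theorem composite_eq (pixels : List String) (p : Nat) (hp : p < 150) :
    composite pixels (p : Int) = firstNe2 pixels 0 p := by
  unfold composite
  rw [compositeGo_eq pixels pixels.length p p (by omega) hp (by omega)]
  have := firstNe2_skip pixels p 0 p (fun u hu1 hu2 => by omega)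
  simp only [Nat.zero_add, List.drop_zero] at this
  exact this.symm

theorem image_eq (pixels : List String) :
    part2Go (List.replicate 150 "2") 0 pixels =
      (PySem.List.pyRange 0 150 1).map (fun p => composite pixels p) := by
  apply List.ext_getElem
  · rw [part2Go_length]
    simp [PySem.List.length_pyRange_one]
  · intro p h1 h2
    have hp : p < 150 := by
      rw [part2Go_length] at h1; simpa using h1
    have hA : (part2Go (List.replicate 150 "2") 0 pixels)[p] =
        (part2Go (List.replicate 150 "2") 0 pixels).getD p "" := by
      rw [List.getD_eq_getElem _ _ h1]
    rw [hA, part2Go_getD pixels _ 0 p (by simp) hp]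
    rw [List.getD_replicate _ (by omega)]
    rw [if_pos rfl]
    rw [List.getElem_map]
    rw [PySem.List.getElem_pyRange_one]
    simp only [Int.zero_add]
    exact (composite_eq pixels p hp).symm

-- ===== VERDICT (by name: the statement is the Claim_ definition above) =====
theorem part2_spec : Claim_equal_part2 := by
  intro pixels _
  unfold Spec_part2 part2 part2_alt
  rw [image_eq]
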